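-- pv_equiv track=rewrite | github.com/seblutzer/Gerenciador-Apostas-Esportivas | Pacotes_Lutzer/calc_resultados.py | verifica_mesmos_valores
-- ===== SOURCE A (Python) =====
-- def verifica_mesmos_valores(padroes):
--     chaves = list(padroes.keys())
--     for i in range(len(chaves)):
--         for j in range(i + 1, len(chaves)):
--             chave1 = chaves[i]
--             chave2 = chaves[j]
--             valores1 = padroes[chave1]
--             valores2 = padroes[chave2]
--             if valores1 == valores2:
--                 return chave1, chave2
--
--     return None
-- ===== SOURCE B (Python) =====
-- def verifica_mesmos_valores(padroes):
--     # Group keys by their (tuple of) values in one pass, then return the first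
--     # two keys of the first group (in first-occurrence order) that has >= 2 keys.
--     grupos = {}
--     for chave, valores in padroes.items():
--         grupos.setdefault(tuple(valores), []).append(chave)
--     for chaves in grupos.values():
--         if len(chaves) >= 2:
--             return chaves[0], chaves[1]
--     return None
-- ===== Notes on version B (the rewrite author's own statement) =====
-- stated objective: faster
-- what changed: replaces the O(n^2) all-pairs scan over keys with a single pass that groups keys by their value tuple in a dict and returns the first two keys of the first group with at least two members
import Mathlib
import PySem

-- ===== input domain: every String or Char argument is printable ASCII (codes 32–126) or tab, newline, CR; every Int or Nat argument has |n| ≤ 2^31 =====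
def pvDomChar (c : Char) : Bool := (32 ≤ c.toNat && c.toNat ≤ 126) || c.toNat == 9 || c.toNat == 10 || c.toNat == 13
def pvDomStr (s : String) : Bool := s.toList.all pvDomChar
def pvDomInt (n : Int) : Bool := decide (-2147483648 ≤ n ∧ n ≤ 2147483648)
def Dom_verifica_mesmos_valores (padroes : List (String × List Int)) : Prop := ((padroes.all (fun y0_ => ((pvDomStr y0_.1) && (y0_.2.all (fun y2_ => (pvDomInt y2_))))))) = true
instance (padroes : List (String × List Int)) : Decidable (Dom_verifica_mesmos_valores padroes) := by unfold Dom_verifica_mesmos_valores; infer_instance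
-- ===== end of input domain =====

-- B replaces A's all-pairs index scan with one grouping pass over a dict keyed by the value list (objective: faster).

-- ===== PORT A =====
-- inner loop: for j in range(i+1, len(chaves)): …  (chaves[i]/chaves[j] are always in range, so pyGetD's default is never used)
def pvAInner (padroes : List (String × List Int)) (chaves : List String) (i : Int) : List Int → Option (String × String)
  | [] => none
  | j :: js =>
      let chave1 := PySem.List.pyGetD chaves i ""
      let chave2 := PySem.List.pyGetD chaves j ""
      let valores1 := (PySem.Dict.mk padroes).getD chave1 []
      let valores2 := (PySem.Dict.mk padroes).getD chave2 []
      if valores1 == valores2 then some (chave1, chave2) else pvAInner padroes chaves i js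

-- outer loop: for i in range(len(chaves)): …  (early return propagated through the match)
def pvAOuter (padroes : List (String × List Int)) (chaves : List String) : List Int → Option (String × String)
  | [] => none
  | i :: is =>
      match pvAInner padroes chaves i (PySem.List.pyRange (i + 1) (chaves.length) 1) with
      | some r => some r
      | none => pvAOuter padroes chaves is

def verifica_mesmos_valores (padroes : List (String × List Int)) : Option (String × String) :=
  let chaves := padroes.map (·.1)
  pvAOuter padroes chaves (PySem.List.pyRange 0 (chaves.length) 1)

-- ===== PORT B =====
-- grupos.setdefault(tuple(valores), []).append(chave)  ==  modify at key valores, default [], append [chave]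
def pvBGroups (padroes : List (String × List Int)) : PySem.Dict (List Int) (List String) :=
  padroes.foldl (fun d p => d.modify p.2 [] (fun g => g ++ [p.1])) PySem.Dict.empty

-- for chaves in grupos.values(): if len(chaves) >= 2: return chaves[0], chaves[1]
def pvBScan : List (List String) → Option (String × String)
  | [] => none
  | ks :: rest =>
      if 2 ≤ ks.length then some (PySem.List.pyGetD ks 0 "", PySem.List.pyGetD ks 1 "")
      else pvBScan rest

def verifica_mesmos_valores_alt (padroes : List (String × List Int)) : Option (String × String) :=
  pvBScan (pvBGroups padroes).values

-- ===== PRECONDITION & SPEC =====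
-- Pre_ excludes association lists with duplicate keys: they cannot arise from a Python dict
-- (A's argument is a dict, whose keys are unique), so A's behaviour there is not defined by the source.
def Pre_verifica_mesmos_valores (padroes : List (String × List Int)) : Prop :=
  (padroes.map Prod.fst).Nodup
instance (padroes : List (String × List Int)) : Decidable (Pre_verifica_mesmos_valores padroes) := by unfold Pre_verifica_mesmos_valores; infer_instance

def pvWitness_verifica_mesmos_valores : (List (String × List Int)) := [("a", [1, 2]), ("b", [3]), ("c", [1, 2])]

def Spec_verifica_mesmos_valores (padroes : List (String × List Int)) (out : Option (String × String)) : Prop := out = verifica_mesmos_valores_alt padroes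
instance (padroes : List (String × List Int)) (out : Option (String × String)) : Decidable (Spec_verifica_mesmos_valores padroes out) := by unfold Spec_verifica_mesmos_valores; infer_instance

-- ===== CLAIM (what is proved, stated in full; the proofs are below) =====
def Claim_equal_verifica_mesmos_valores : Prop := ∀ (padroes : List (String × List Int)), Dom_verifica_mesmos_valores padroes → Pre_verifica_mesmos_valores padroes → Spec_verifica_mesmos_valores padroes (verifica_mesmos_valores padroes)

-- ===== LEMMAS AND PROOFS =====

-- the common recursive specification: first key that shares its value list with a later key,
-- paired with the first such later key
def pvRec : List (String × List Int) → Option (String × String)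
  | [] => none
  | (k, v) :: l =>
      match l.find? (fun p => p.2 == v) with
      | some p => some (k, p.1)
      | none => pvRec l

theorem pvUpdCharN : ∀ (n : Nat) (xs s : List (List Int)), xs.length ≤ n →
    PySem.Set.update s xs = s ++ PySem.Set.update [] (xs.filter (fun x => !decide (x ∈ s))) := by
  intro n
  induction n with
  | zero =>
    intro xs s h
    have : xs = [] := List.eq_nil_of_length_eq_zero (Nat.le_zero.mp h)
    subst this
    simp [PySem.Set.update]
  | succ n ih =>
    intro xs s h
    match xs with
    | [] => simp [PySem.Set.update]
    | x :: xs =>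
      have hlen : xs.length ≤ n := by simpa using h
      show PySem.Set.update (PySem.Set.add s x) xs = _
      by_cases hx : x ∈ s
      · have ha : PySem.Set.add s x = s := by simp [PySem.Set.add, hx]
        rw [ha, ih xs s hlen]
        simp [hx]
      · have ha : PySem.Set.add s x = s ++ [x] := by simp [PySem.Set.add, hx]
        rw [ha, ih xs (s ++ [x]) hlen]
        have hhead : (List.filter (fun y => !decide (y ∈ s)) (x :: xs)) = x :: xs.filter (fun y => !decide (y ∈ s)) := by
          simp [List.filter_cons, hx]
        rw [hhead]
        show _ = s ++ PySem.Set.update (PySem.Set.add [] x) (xs.filter fun y => !decide (y ∈ s))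
        have ha2 : PySem.Set.add ([] : List (List Int)) x = [x] := by simp [PySem.Set.add]
        have hflen : (xs.filter fun y => !decide (y ∈ s)).length ≤ n :=
          le_trans (List.length_filter_le _ _) hlen
        rw [ha2, ih _ [x] hflen]
        simp only [List.append_assoc, List.singleton_append, List.filter_filter]
        congr 3
        apply List.filter_congr
        intro a _
        simp only [List.mem_append, List.mem_singleton]
        rcases Decidable.em (a ∈ s) with h1 | h1 <;> rcases Decidable.em (a = x) with h2 | h2 <;> simp [h1, h2]

theorem pvUpdPeel (v : List Int) (vs : List (List Int)) :
    PySem.Set.update [] (v :: vs) = v :: PySem.Set.update [] (vs.filter (fun x => !decide (x = v))) := by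
  show PySem.Set.update (PySem.Set.add [] v) vs = _
  have ha : PySem.Set.add ([] : List (List Int)) v = [v] := by simp [PySem.Set.add]
  rw [ha, pvUpdCharN vs.length vs [v] le_rfl]
  simp

def pvKeysWith (c : List Int) (l : List (String × List Int)) : List String :=
  (l.filter (fun p => p.2 == c)).map (·.1)

theorem pvValuesG (l : List (String × List Int)) :
    (pvBGroups l).values = (PySem.Set.update ([] : List (List Int)) (l.map (·.2))).map (fun c => pvKeysWith c l) := by
  have hswap : pvBGroups l = (l.map (fun p => (p.2, p.1))).foldl
      (fun d q => d.modify q.1 [] (fun g => g ++ [q.2])) PySem.Dict.empty := by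
    rw [List.foldl_map]
    rfl
  have hkeys : (pvBGroups l).keys = PySem.Set.update ([] : List (List Int)) (l.map (·.2)) := by
    have := PySem.Dict.keys_foldl_modify_key (l.map (fun p => (p.2, p.1))) Prod.fst
      ([] : List String) (fun d q g => g ++ [q.2]) PySem.Dict.empty
    rw [hswap]
    simpa [List.map_map, Function.comp] using this
  have hnd : (pvBGroups l).keys.Nodup := by
    rw [hswap]
    exact PySem.Dict.nodup_keys_foldl_modify_key _ Prod.fst _ _ _ (by simp [PySem.Dict.keys_empty])
  have hgetD : ∀ c, (pvBGroups l).getD c [] = pvKeysWith c l := by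
    intro c
    rw [hswap]
    rw [PySem.Dict.getD_foldl_modify_append]
    simp [pvKeysWith, PySem.Dict.getD_empty, List.filter_map, Function.comp_def, List.map_map]
  rw [PySem.Dict.values_eq_map_keys _ hnd [], hkeys]
  exact List.map_congr_left (fun c _ => hgetD c)

theorem pvScan_eq_rec (l : List (String × List Int)) :
    pvBScan ((PySem.Set.update ([] : List (List Int)) (l.map (·.2))).map (fun c => pvKeysWith c l)) = pvRec l := by
  induction l with
  | nil => simp [PySem.Set.update, pvBScan, pvRec]
  | cons p t ih =>
    obtain ⟨k, v⟩ := p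
    rw [List.map_cons, pvUpdPeel, List.map_cons]
    have hkw : pvKeysWith v ((k, v) :: t) = k :: pvKeysWith v t := by
      simp [pvKeysWith]
    rw [hkw]
    cases hfind : t.find? (fun p => p.2 == v) with
    | some q =>
      have hhead : (t.filter (fun p => p.2 == v)).head? = some q := by
        rw [List.head?_filter, hfind]
      obtain ⟨rest', hrest⟩ : ∃ r, t.filter (fun p => p.2 == v) = q :: r := by
        cases hf : t.filter (fun p => p.2 == v) with
        | nil => rw [hf] at hhead; simp at hhead
        | cons a r => rw [hf] at hhead; simp at hhead; exact ⟨r, by rw [hhead]⟩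
      have hkv : pvKeysWith v t = q.1 :: rest'.map (·.1) := by
        simp [pvKeysWith, hrest]
      rw [hkv]
      show pvBScan ((k :: q.1 :: rest'.map (·.1)) :: _) = pvRec ((k, v) :: t)
      have hlen : 2 ≤ (k :: q.1 :: rest'.map (·.1)).length := by simp
      simp only [pvBScan, hlen, if_pos]
      simp [pvRec, hfind, PySem.List.pyGetD]
    | none =>
      have hne : ∀ p ∈ t, p.2 ≠ v := by
        intro p hp
        have := List.find?_eq_none.mp hfind p hp
        simpa using this
      have hkv : pvKeysWith v t = [] := by
        simp only [pvKeysWith, List.map_eq_nil_iff, List.filter_eq_nil_iff]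
        intro p hp; simpa using hne p hp
      rw [hkv]
      show pvBScan ([k] :: _) = pvRec ((k, v) :: t)
      have h1 : ¬ (2 ≤ ([k] : List String).length) := by simp
      simp only [pvBScan, h1, if_neg]
      have hfil : (t.map (·.2)).filter (fun x => !decide (x = v)) = t.map (·.2) := by
        apply List.filter_eq_self.mpr
        intro c hc
        obtain ⟨p, hp, rfl⟩ := List.mem_map.mp hc
        simp [hne p hp]
      rw [hfil]
      have hmapeq : (PySem.Set.update ([] : List (List Int)) (t.map (·.2))).map (fun c => pvKeysWith c ((k, v) :: t))
          = (PySem.Set.update ([] : List (List Int)) (t.map (·.2))).map (fun c => pvKeysWith c t) := by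
        apply List.map_congr_left
        intro c hc
        have hcv : c ≠ v := by
          have : c ∈ t.map (·.2) := by
            have := (PySem.Set.mem_update ([] : List (List Int)) (t.map (·.2)) c).mp hc
            simpa using this
          obtain ⟨p, hp, rfl⟩ := List.mem_map.mp this
          exact hne p hp
        simp [pvKeysWith, List.filter_cons, Ne.symm hcv]
      rw [hmapeq, ih]
      simp [pvRec, hfind]

theorem pvLookup (padroes : List (String × List Int)) (hnd : (padroes.map Prod.fst).Nodup)
    (p : String × List Int) (hp : p ∈ padroes) :
    (PySem.Dict.mk padroes).getD p.1 [] = p.2 := by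
  apply PySem.Dict.getD_of_mem_items (d := PySem.Dict.mk padroes) (k := p.1) (v := p.2)
  · exact hp
  · exact hnd

theorem pvInnerLem (padroes : List (String × List Int)) (hnd : (padroes.map Prod.fst).Nodup)
    (i : Nat) (hi : i < padroes.length) :
    ∀ (m j : Nat), padroes.length - j ≤ m →
    pvAInner padroes (padroes.map Prod.fst) (i : Int) (PySem.List.pyRange (j : Int) ((padroes.map Prod.fst).length) 1) =
      ((padroes.drop j).find? (fun p => p.2 == padroes[i].2)).map (fun q => (padroes[i].1, q.1)) := by
  intro m
  induction m with
  | zero =>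
    intro j h
    have hj : padroes.length ≤ j := by omega
    rw [PySem.List.pyRange_one_eq_nil (by simp; exact_mod_cast hj)]
    rw [List.drop_eq_nil_of_le hj]
    simp [pvAInner]
  | succ m ih =>
    intro j h
    by_cases hj : padroes.length ≤ j
    · rw [PySem.List.pyRange_one_eq_nil (by simp; exact_mod_cast hj)]
      rw [List.drop_eq_nil_of_le hj]
      simp [pvAInner]
    · push_neg at hj
      have hcons : PySem.List.pyRange (j : Int) ((padroes.map Prod.fst).length) 1
          = (j : Int) :: PySem.List.pyRange ((j : Int) + 1) ((padroes.map Prod.fst).length) 1 := by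
        apply PySem.List.pyRange_one_cons
        simp; exact_mod_cast hj
      rw [hcons]
      show (if ((PySem.Dict.mk padroes).getD (PySem.List.pyGetD (padroes.map Prod.fst) (i : Int) "") [] ==
              (PySem.Dict.mk padroes).getD (PySem.List.pyGetD (padroes.map Prod.fst) (j : Int) "") [])
            then some (PySem.List.pyGetD (padroes.map Prod.fst) (i : Int) "", PySem.List.pyGetD (padroes.map Prod.fst) (j : Int) "")
            else pvAInner padroes (padroes.map Prod.fst) (i : Int) (PySem.List.pyRange ((j : Int) + 1) ((padroes.map Prod.fst).length) 1)) = _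
      have hgi : PySem.List.pyGetD (padroes.map Prod.fst) (i : Int) "" = padroes[i].1 := by
        rw [PySem.List.pyGetD_ofNat _ i _ (by simpa using hi)]
        simp
      have hgj : PySem.List.pyGetD (padroes.map Prod.fst) (j : Int) "" = padroes[j].1 := by
        rw [PySem.List.pyGetD_ofNat _ j _ (by simpa using hj)]
        simp
      rw [hgi, hgj, pvLookup padroes hnd _ (padroes.getElem_mem hi), pvLookup padroes hnd _ (padroes.getElem_mem hj)]
      rw [List.drop_eq_getElem_cons hj]
      rw [List.find?_cons]
      by_cases heq : padroes[j].2 = padroes[i].2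
      · have h1 : (padroes[i].2 == padroes[j].2) = true := by simp [heq]
        have h2 : (padroes[j].2 == padroes[i].2) = true := by simp [heq]
        rw [h1, h2]
        simp [heq]
      · have h1 : (padroes[i].2 == padroes[j].2) = false := by simp; exact fun hh => heq hh.symm
        have h2 : (padroes[j].2 == padroes[i].2) = false := by simp [heq]
        rw [h1, h2]
        simp only [Bool.false_eq_true, if_false]
        have : ((j : Int) + 1) = ((j + 1 : Nat) : Int) := by push_cast; ring
        rw [this, ih (j + 1) (by omega)]

theorem pvOuterLem (padroes : List (String × List Int)) (hnd : (padroes.map Prod.fst).Nodup) :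
    ∀ (m i : Nat), padroes.length - i ≤ m →
    pvAOuter padroes (padroes.map Prod.fst) (PySem.List.pyRange (i : Int) ((padroes.map Prod.fst).length) 1) =
      pvRec (padroes.drop i) := by
  intro m
  induction m with
  | zero =>
    intro i h
    have hi : padroes.length ≤ i := by omega
    rw [PySem.List.pyRange_one_eq_nil (by simp; exact_mod_cast hi)]
    rw [List.drop_eq_nil_of_le hi]
    simp [pvAOuter, pvRec]
  | succ m ih =>
    intro i h
    by_cases hi : padroes.length ≤ i
    · rw [PySem.List.pyRange_one_eq_nil (by simp; exact_mod_cast hi)]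
      rw [List.drop_eq_nil_of_le hi]
      simp [pvAOuter, pvRec]
    · push_neg at hi
      have hcons : PySem.List.pyRange (i : Int) ((padroes.map Prod.fst).length) 1
          = (i : Int) :: PySem.List.pyRange ((i : Int) + 1) ((padroes.map Prod.fst).length) 1 := by
        apply PySem.List.pyRange_one_cons
        simp; exact_mod_cast hi
      rw [hcons]
      show (match pvAInner padroes (padroes.map Prod.fst) (i : Int)
              (PySem.List.pyRange ((i : Int) + 1) ((padroes.map Prod.fst).length) 1) with
            | some r => some r
            | none => pvAOuter padroes (padroes.map Prod.fst)
                (PySem.List.pyRange ((i : Int) + 1) ((padroes.map Prod.fst).length) 1)) = _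
      have hc : ((i : Int) + 1) = ((i + 1 : Nat) : Int) := by push_cast; ring
      rw [hc, pvInnerLem padroes hnd i hi (padroes.length - (i+1)) (i+1) le_rfl]
      rw [List.drop_eq_getElem_cons hi]
      have hrec : pvRec (padroes[i] :: padroes.drop (i+1))
          = (match (padroes.drop (i+1)).find? (fun p => p.2 == padroes[i].2) with
             | some p => some (padroes[i].1, p.1)
             | none => pvRec (padroes.drop (i+1))) := by
        conv_lhs => rw [show padroes[i] = (padroes[i].1, padroes[i].2) from rfl]
        rfl
      rw [hrec]
      cases hf : (padroes.drop (i+1)).find? (fun p => p.2 == padroes[i].2) with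
      | some q => simp
      | none =>
        simp only [Option.map_none]
        rw [ih (i+1) (by omega)]

theorem pvA_eq_rec (padroes : List (String × List Int))
    (h : (padroes.map Prod.fst).Nodup) :
    verifica_mesmos_valores padroes = pvRec padroes := by
  show pvAOuter padroes (padroes.map (·.1)) (PySem.List.pyRange 0 ((padroes.map (·.1)).length) 1) = _
  have h0 : (0 : Int) = ((0 : Nat) : Int) := rfl
  rw [h0, pvOuterLem padroes h padroes.length 0 (by omega)]
  simp

theorem pvB_eq_rec (padroes : List (String × List Int)) :
    verifica_mesmos_valores_alt padroes = pvRec padroes := by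
  show pvBScan (pvBGroups padroes).values = _
  rw [pvValuesG, pvScan_eq_rec]

-- ===== VERDICT (by name: the statement is the Claim_ definition above) =====
theorem verifica_mesmos_valores_spec : Claim_equal_verifica_mesmos_valores := by
  intro padroes _ hpre
  unfold Spec_verifica_mesmos_valores
  rw [pvA_eq_rec padroes hpre, pvB_eq_rec padroes]
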